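-- pv_equiv track=rewrite | github.com/NickkeyNikNik/CITS1401 | project 1.py | extract_month_case_min_max
-- ===== SOURCE A (Python) =====
-- def extract_month_case_min_max(vid_data,month,min_or_max):
--         min_or_max_case = []
--         for x in range(len(vid_data)):
--             if vid_data[x][1].split("/")[1] == month and int(vid_data[x][2]) > 0: # Checks the data to match both the month and ensure the data is not 0
--                 min_or_max_case.append(int(vid_data[x][2])) # Puts the data into a list to be sorted later in the function
--         if min_or_max_case == []: # Special case for when there are no cases in that specified month, it returns a 0
--             return 0
--         else:
--             if min_or_max == 'min': # Returns min or max case based on the desired result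
--                 return min(min_or_max_case)
--             else:
--                 return max(min_or_max_case)
-- ===== SOURCE B (Python) =====
-- def extract_month_case_min_max(vid_data, month, min_or_max):
--     best = None
--     for row in vid_data:
--         if row[1].split("/")[1] == month:
--             v = int(row[2])
--             if v > 0:
--                 if best is None:
--                     best = v
--                 elif min_or_max == 'min':
--                     best = min(best, v)
--                 else:
--                     best = max(best, v)
--     return 0 if best is None else best
-- ===== Notes on version B (the rewrite author's own statement) =====
-- stated objective: simpler
-- what changed: Single pass over the rows threading the running extremum in a scalar Option accumulator instead of first materialising the list of matching counts and then calling min/max on it.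
import Mathlib
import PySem

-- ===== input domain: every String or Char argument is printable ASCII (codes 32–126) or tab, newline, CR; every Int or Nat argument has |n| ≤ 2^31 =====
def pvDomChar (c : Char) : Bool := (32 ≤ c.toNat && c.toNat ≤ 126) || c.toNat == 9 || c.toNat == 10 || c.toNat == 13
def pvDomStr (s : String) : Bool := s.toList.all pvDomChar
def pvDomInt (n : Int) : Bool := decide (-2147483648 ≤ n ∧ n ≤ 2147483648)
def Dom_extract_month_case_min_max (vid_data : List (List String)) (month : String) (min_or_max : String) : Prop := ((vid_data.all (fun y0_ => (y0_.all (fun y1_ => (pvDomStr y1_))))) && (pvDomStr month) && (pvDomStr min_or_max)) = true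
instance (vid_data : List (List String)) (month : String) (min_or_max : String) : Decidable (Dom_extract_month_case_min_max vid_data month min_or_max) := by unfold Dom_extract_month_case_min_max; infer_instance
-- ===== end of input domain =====

-- B replaces A's collect-then-min/max pass with a single pass threading the running extremum
-- in an Option accumulator (objective: simpler; equal cost).


-- ===== PORT A =====
def extract_month_case_min_max (vid_data : List (List String)) (month : String) (min_or_max : String) : Int :=
  let min_or_max_case : List Int :=
    (PySem.List.pyRange 0 (vid_data.length : Int) 1).foldl
      (fun acc x =>
        let row := PySem.List.pyGetD vid_data x []
        if (PySem.List.pyGetD ((PySem.Str.split? (PySem.List.pyGetD row 1 "") "/").getD []) 1 "") == month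
            && decide (0 < (PySem.Int.ofStr? (PySem.List.pyGetD row 2 "")).getD 0) then
          acc ++ [(PySem.Int.ofStr? (PySem.List.pyGetD row 2 "")).getD 0]
        else acc) []
  if min_or_max_case = [] then 0
  else if min_or_max == "min" then (PySem.List.min? min_or_max_case (fun y => y)).getD 0
  else (PySem.List.max? min_or_max_case (fun y => y)).getD 0

-- ===== PORT B =====
def extract_month_case_min_max_alt (vid_data : List (List String)) (month : String) (min_or_max : String) : Int :=
  let best : Option Int :=
    vid_data.foldl
      (fun best row =>
        if (PySem.List.pyGetD ((PySem.Str.split? (PySem.List.pyGetD row 1 "") "/").getD []) 1 "") == month then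
          let v := (PySem.Int.ofStr? (PySem.List.pyGetD row 2 "")).getD 0
          if 0 < v then
            match best with
            | none => some v
            | some m => if min_or_max == "min" then some (min m v) else some (max m v)
          else best
        else best) none
  match best with
  | none => 0
  | some m => m

-- ===== PRECONDITION & SPEC =====
-- Pre_ excludes exactly the inputs where the Python A raises: a row shorter than 2 fields or whose
-- second field contains no '/' (IndexError), or a month-matching row lacking a third field or whose
-- third field int() cannot parse (IndexError/ValueError).
def Pre_extract_month_case_min_max (vid_data : List (List String)) (month : String) (min_or_max : String) : Prop :=
  ∀ row ∈ vid_data,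
    2 ≤ row.length ∧
    2 ≤ ((PySem.Str.split? (PySem.List.pyGetD row 1 "") "/").getD []).length ∧
    ((PySem.List.pyGetD ((PySem.Str.split? (PySem.List.pyGetD row 1 "") "/").getD []) 1 "") = month →
      3 ≤ row.length ∧ (PySem.Int.ofStr? (PySem.List.pyGetD row 2 "")).isSome)
instance (vid_data : List (List String)) (month : String) (min_or_max : String) : Decidable (Pre_extract_month_case_min_max vid_data month min_or_max) := by unfold Pre_extract_month_case_min_max; infer_instance

def pvWitness_extract_month_case_min_max : List (List String) × String × String :=
  ([["a", "1/Jan", "5"], ["b", "2/Feb", "3"]], "Jan", "min")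

def Spec_extract_month_case_min_max (vid_data : List (List String)) (month : String) (min_or_max : String) (out : Int) : Prop := out = extract_month_case_min_max_alt vid_data month min_or_max
instance (vid_data : List (List String)) (month : String) (min_or_max : String) (out : Int) : Decidable (Spec_extract_month_case_min_max vid_data month min_or_max out) := by unfold Spec_extract_month_case_min_max; infer_instance

-- ===== CLAIM (what is proved, stated in full; the proofs are below) =====
def Claim_equal_extract_month_case_min_max : Prop := ∀ (vid_data : List (List String)) (month : String) (min_or_max : String), Dom_extract_month_case_min_max vid_data month min_or_max → Pre_extract_month_case_min_max vid_data month min_or_max → Spec_extract_month_case_min_max vid_data month min_or_max (extract_month_case_min_max vid_data month min_or_max)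

-- ===== LEMMAS AND PROOFS =====

-- the shared per-row condition and value
def pvCond (month : String) (row : List String) : Bool :=
  (PySem.List.pyGetD ((PySem.Str.split? (PySem.List.pyGetD row 1 "") "/").getD []) 1 "") == month
    && decide (0 < (PySem.Int.ofStr? (PySem.List.pyGetD row 2 "")).getD 0)

def pvVal (row : List String) : Int := (PySem.Int.ofStr? (PySem.List.pyGetD row 2 "")).getD 0

-- B's step function, with the min/max choice abstracted as op
def pvStep (month : String) (op : Int → Int → Int) (best : Option Int) (row : List String) : Option Int :=
  if (PySem.List.pyGetD ((PySem.Str.split? (PySem.List.pyGetD row 1 "") "/").getD []) 1 "") == month then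
    let v := pvVal row
    if 0 < v then
      match best with
      | none => some v
      | some m => some (op m v)
    else best
  else best

lemma pvStep_eq (month : String) (op : Int → Int → Int) (best : Option Int) (row : List String) :
    pvStep month op best row =
      if pvCond month row then
        match best with
        | none => some (pvVal row)
        | some m => some (op m (pvVal row))
      else best := by
  unfold pvStep pvCond pvVal
  by_cases h1 : (PySem.List.pyGetD ((PySem.Str.split? (PySem.List.pyGetD row 1 "") "/").getD []) 1 "") == month <;>
    by_cases h2 : 0 < (PySem.Int.ofStr? (PySem.List.pyGetD row 2 "")).getD 0 <;>
    simp [h1, h2]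

lemma pvFold_some (month : String) (op : Int → Int → Int) (rows : List (List String)) (a : Int) :
    rows.foldl (pvStep month op) (some a) =
      some (((rows.filter (pvCond month)).map pvVal).foldl op a) := by
  induction rows generalizing a with
  | nil => simp
  | cons r t ih =>
    rw [List.foldl_cons, pvStep_eq]
    by_cases hc : pvCond month r <;> simp [hc, ih]

lemma pvFold_none (month : String) (op : Int → Int → Int) (rows : List (List String)) :
    rows.foldl (pvStep month op) none =
      match (rows.filter (pvCond month)).map pvVal with
      | [] => none
      | x :: t => some (t.foldl op x) := by
  induction rows with
  | nil => simp
  | cons r t ih =>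
    rw [List.foldl_cons, pvStep_eq]
    by_cases hc : pvCond month r <;> simp [hc, ih, pvFold_some]

lemma pvAlt_eq (vid_data : List (List String)) (month : String) (min_or_max : String) :
    extract_month_case_min_max_alt vid_data month min_or_max =
      match (vid_data.filter (pvCond month)).map pvVal with
      | [] => 0
      | x :: t => t.foldl (if min_or_max == "min" then min else max) x := by
  unfold extract_month_case_min_max_alt
  have hstep : (fun (best : Option Int) (row : List String) =>
      if (PySem.List.pyGetD ((PySem.Str.split? (PySem.List.pyGetD row 1 "") "/").getD []) 1 "") == month then
        let v := (PySem.Int.ofStr? (PySem.List.pyGetD row 2 "")).getD 0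
        if 0 < v then
          match best with
          | none => some v
          | some m => if min_or_max == "min" then some (min m v) else some (max m v)
        else best
      else best) = pvStep month (if min_or_max == "min" then min else max) := by
    funext best row
    unfold pvStep pvVal
    by_cases hm : min_or_max == "min" <;> simp [hm]
  rw [hstep, pvFold_none]
  cases h : (vid_data.filter (pvCond month)).map pvVal <;> simp

lemma pvA_eq (vid_data : List (List String)) (month : String) (min_or_max : String) :
    extract_month_case_min_max vid_data month min_or_max =
      match (vid_data.filter (pvCond month)).map pvVal with
      | [] => 0
      | x :: t => t.foldl (if min_or_max == "min" then min else max) x := by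
  unfold extract_month_case_min_max
  have key : List.foldl
      (fun acc x =>
        have row := PySem.List.pyGetD vid_data x [];
        if (PySem.List.pyGetD ((PySem.Str.split? (PySem.List.pyGetD row 1 "") "/").getD []) 1 "" == month &&
            decide (0 < (PySem.Int.ofStr? (PySem.List.pyGetD row 2 "")).getD 0)) = true then
          acc ++ [(PySem.Int.ofStr? (PySem.List.pyGetD row 2 "")).getD 0]
        else acc)
      [] (PySem.List.pyRange 0 (vid_data.length : Int) 1)
      = (vid_data.filter (pvCond month)).map pvVal :=
    Eq.trans
      (PySem.List.foldl_pyRange_zero_pyGetD' vid_data []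
        (fun acc row => if pvCond month row then acc ++ [pvVal row] else acc) [])
      (PySem.List.foldl_append_if (pvCond month) pvVal vid_data [])
  rw [key]
  cases h : (vid_data.filter (pvCond month)).map pvVal with
  | nil => simp
  | cons x t =>
    by_cases hm : min_or_max == "min" <;>
      simp [hm, PySem.List.min?_id_cons, PySem.List.max?_id_cons]

-- ===== VERDICT (by name: the statement is the Claim_ definition above) =====
theorem extract_month_case_min_max_spec : Claim_equal_extract_month_case_min_max := by
  intro vid_data month min_or_max _ _
  unfold Spec_extract_month_case_min_max
  rw [pvA_eq, pvAlt_eq]
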